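-- pv_equiv track=rewrite | github.com/fmarotta/learnBlast | blast.py | score_pair
-- ===== SOURCE A (Python) =====
-- def score_pair(p1, p2, match = 5, mismatch = -4):
--     """Score a pair
--
--     Assume that len(p1) == len(p2) and compute the score using the
--     rules in the parameters.
--     """
--     score = 0
--     for i in range(0, len(p1)):
--         if p1[i] == p2[i]:
--             score = score + match
--         else:
--             score = score + mismatch
--     return score
-- ===== SOURCE B (Python) =====
-- def score_pair(p1, p2, match = 5, mismatch = -4):
--     """Score a pair by divide and conquer: split both strings in half,
--     score each half recursively, and add the two half-scores."""
--     if len(p1) == 0: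
--         return 0
--     if len(p1) == 1:
--         return match if p1[0] == p2[0] else mismatch
--     mid = len(p1) // 2
--     return (score_pair(p1[:mid], p2[:mid], match, mismatch)
--             + score_pair(p1[mid:], p2[mid:], match, mismatch))
-- ===== Notes on version B (the rewrite author's own statement) =====
-- stated objective: alternative
-- what changed: Replaces A's left-to-right branch-and-accumulate index loop by a divide-and-conquer recursion that splits both strings at the midpoint, scores each half recursively and adds the half-scores.
import Mathlib
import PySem

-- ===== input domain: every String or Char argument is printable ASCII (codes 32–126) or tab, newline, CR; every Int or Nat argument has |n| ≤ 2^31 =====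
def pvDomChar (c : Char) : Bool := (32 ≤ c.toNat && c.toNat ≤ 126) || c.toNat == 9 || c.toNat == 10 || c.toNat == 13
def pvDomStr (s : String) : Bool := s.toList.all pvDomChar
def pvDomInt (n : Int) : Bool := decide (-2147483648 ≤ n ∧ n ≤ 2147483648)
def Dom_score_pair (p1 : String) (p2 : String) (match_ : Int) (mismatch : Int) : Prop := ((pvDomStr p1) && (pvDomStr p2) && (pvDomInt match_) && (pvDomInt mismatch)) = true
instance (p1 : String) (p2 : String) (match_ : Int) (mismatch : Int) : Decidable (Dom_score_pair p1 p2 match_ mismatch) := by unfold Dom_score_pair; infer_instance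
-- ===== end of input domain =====

-- B replaces A's left-to-right accumulate loop by a divide-and-conquer recursion
-- that halves both strings and adds the two half-scores (objective: alternative).

-- ===== PORT A =====
def score_pair (p1 : String) (p2 : String) (match_ : Int) (mismatch : Int) : Int :=
  (PySem.List.pyRange 0 (PySem.Str.len p1) 1).foldl
    (fun score i =>
      if PySem.List.pyGetD p1.toList i '?' = PySem.List.pyGetD p2.toList i '?'
      then score + match_ else score + mismatch) 0

-- ===== PORT B =====
-- recursive helper of Source B, on the character lists; p1[:mid]/p1[mid:] with
-- 0 ≤ mid ≤ len(p1) are exactly List.take mid / List.drop mid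
def spGo (match_ mismatch : Int) (a b : List Char) : Int :=
  if h0 : a.length = 0 then 0
  else if h1 : a.length = 1 then
    (if PySem.List.pyGetD a 0 '?' = PySem.List.pyGetD b 0 '?' then match_ else mismatch)
  else
    spGo match_ mismatch (a.take (a.length / 2)) (b.take (a.length / 2))
    + spGo match_ mismatch (a.drop (a.length / 2)) (b.drop (a.length / 2))
termination_by a.length
decreasing_by
  · simp [List.length_take]; omega
  · simp [List.length_drop]; omega

def score_pair_alt (p1 : String) (p2 : String) (match_ : Int) (mismatch : Int) : Int :=
  spGo match_ mismatch p1.toList p2.toList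

-- ===== PRECONDITION & SPEC =====
-- Python A raises IndexError at p2[i] when p2 is shorter than p1; exactly those inputs are excluded.
def Pre_score_pair (p1 : String) (p2 : String) (match_ : Int) (mismatch : Int) : Prop :=
  p1.toList.length ≤ p2.toList.length
instance (p1 : String) (p2 : String) (match_ : Int) (mismatch : Int) : Decidable (Pre_score_pair p1 p2 match_ mismatch) := by unfold Pre_score_pair; infer_instance
def pvWitness_score_pair : String × String × Int × Int := ("acgt", "aagt", 5, -4)
def Spec_score_pair (p1 : String) (p2 : String) (match_ : Int) (mismatch : Int) (out : Int) : Prop := out = score_pair_alt p1 p2 match_ mismatch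
instance (p1 : String) (p2 : String) (match_ : Int) (mismatch : Int) (out : Int) : Decidable (Spec_score_pair p1 p2 match_ mismatch out) := by unfold Spec_score_pair; infer_instance

-- ===== CLAIM (what is proved, stated in full; the proofs are below) =====
def Claim_equal_score_pair : Prop := ∀ (p1 : String) (p2 : String) (match_ : Int) (mismatch : Int), Dom_score_pair p1 p2 match_ mismatch → Pre_score_pair p1 p2 match_ mismatch → Spec_score_pair p1 p2 match_ mismatch (score_pair p1 p2 match_ mismatch)

-- ===== LEMMAS AND PROOFS =====

-- common yardstick: per-position scores of the zipped pair, summed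
def zipScore (match_ mismatch : Int) (a b : List Char) : Int :=
  ((a.zip b).map (fun p => if p.1 = p.2 then match_ else mismatch)).sum

theorem zip_take (a b : List Char) (n : Nat) :
    (a.zip b).take n = (a.take n).zip (b.take n) := by
  simp [List.zip, List.take_zipWith]

theorem zip_drop (a b : List Char) (n : Nat) :
    (a.zip b).drop n = (a.drop n).zip (b.drop n) := by
  simp [List.zip, List.drop_zipWith]

-- B's divide-and-conquer equals the zip sum when b is at least as long as a
theorem spGo_eq_zipScore (match_ mismatch : Int) :
    ∀ n (a b : List Char), a.length = n → a.length ≤ b.length →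
      spGo match_ mismatch a b = zipScore match_ mismatch a b := by
  intro n
  induction n using Nat.strong_induction_on with
  | _ n ih =>
    intro a b hn hle
    rw [spGo]
    by_cases h0 : a.length = 0
    · have : a = [] := List.eq_nil_of_length_eq_zero h0
      simp [this, zipScore]
    · by_cases h1 : a.length = 1
      · obtain ⟨x, hx⟩ := List.length_eq_one_iff.mp h1
        subst hx
        obtain ⟨y, t, hy⟩ : ∃ y t, b = y :: t := by
          cases b with
          | nil => simp at hle
          | cons y t => exact ⟨y, t, rfl⟩
        subst hy
        simp [h1, zipScore, PySem.List.pyGetD_ofNat']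
      · have h2 : 2 ≤ a.length := by omega
        set mid := a.length / 2 with hmid
        have hmid1 : 1 ≤ mid := by omega
        have hmidlt : mid < a.length := by omega
        have ht : (a.take mid).length = mid := by simp; omega
        have hd : (a.drop mid).length = a.length - mid := by simp
        rw [ih mid (by omega) _ _ ht (by simp [List.length_take]; omega),
            ih (a.length - mid) (by omega) _ _ hd (by simp [List.length_drop]; omega)]
        simp only [h0, h1]
        unfold zipScore
        rw [← zip_take, ← zip_drop, ← List.sum_take_add_sum_drop
              ((a.zip b).map (fun p => if p.1 = p.2 then match_ else mismatch)) mid,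
            List.map_take, List.map_drop]
        simp

-- A's accumulate loop equals the zip sum when b is at least as long as a
theorem foldA_eq_zipScore (match_ mismatch : Int) (a b : List Char)
    (hle : a.length ≤ b.length) :
    (PySem.List.pyRange 0 (a.length : Int) 1).foldl
      (fun score i =>
        if PySem.List.pyGetD a i '?' = PySem.List.pyGetD b i '?'
        then score + match_ else score + mismatch) 0
      = zipScore match_ mismatch a b := by
  induction a generalizing b with
  | nil => simp [zipScore, PySem.List.pyRange_one_eq_nil]
  | cons x t ih =>
    cases b with
    | nil => simp at hle
    | cons y u =>
      have hstep : (PySem.List.pyRange 0 ((x :: t).length : Int) 1)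
          = 0 :: PySem.List.pyRange 1 ((x :: t).length : Int) 1 := by
        apply PySem.List.pyRange_one_cons; simp
      rw [hstep]
      simp only [List.foldl_cons]
      have hshift : ∀ (s : Int),
          (PySem.List.pyRange 1 ((x :: t).length : Int) 1).foldl
            (fun score i =>
              if PySem.List.pyGetD (x :: t) i '?' = PySem.List.pyGetD (y :: u) i '?'
              then score + match_ else score + mismatch) s
          = (PySem.List.pyRange 0 (t.length : Int) 1).foldl
            (fun score i =>
              if PySem.List.pyGetD t i '?' = PySem.List.pyGetD u i '?'
              then score + match_ else score + mismatch) s := by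
        intro s
        have hrange : PySem.List.pyRange 1 ((x :: t).length : Int) 1
            = (PySem.List.pyRange 0 (t.length : Int) 1).map (fun i => i + 1) := by
          rw [PySem.List.pyRange_one 1, PySem.List.pyRange_one 0]
          simp [List.map_map, Function.comp]
          intro k _
          omega
        rw [hrange, List.foldl_map]
        apply PySem.List.foldl_congr_mem
        intro acc i hi
        have h01 : 0 ≤ i := (PySem.List.mem_pyRange_one.mp hi).1
        obtain ⟨k, hk⟩ : ∃ k : Nat, i = (k : Int) := ⟨i.toNat, by omega⟩
        subst hk
        have : ((k : Int) + 1) = ((k + 1 : Nat) : Int) := by push_cast; ring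
        rw [this, PySem.List.pyGetD_natCast, PySem.List.pyGetD_natCast,
            PySem.List.pyGetD_natCast, PySem.List.pyGetD_natCast]
        simp
      rw [hshift]
      have hacc' : ∀ (L : List Int) (P : Int → Prop) [DecidablePred P] (c : Int),
          L.foldl (fun score i => if P i then score + match_ else score + mismatch) c
          = c + L.foldl (fun score i => if P i then score + match_ else score + mismatch) 0 := by
        intro L P _
        induction L with
        | nil => simp
        | cons z zs ihz =>
          intro c
          simp only [List.foldl_cons]
          rw [ihz, ihz (if P z then 0 + match_ else 0 + mismatch)]
          split <;> ring
      rw [hacc' _ (fun i => PySem.List.pyGetD t i '?' = PySem.List.pyGetD u i '?')]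
      rw [ih u (by simpa using Nat.le_of_succ_le_succ hle)]
      have hx : PySem.List.pyGetD (x :: t) (0 : Int) '?' = x := by
        simp [PySem.List.pyGetD_ofNat']
      have hy : PySem.List.pyGetD (y :: u) (0 : Int) '?' = y := by
        simp [PySem.List.pyGetD_ofNat']
      rw [hx, hy]
      unfold zipScore
      simp only [List.zip_cons_cons, List.map_cons, List.sum_cons]
      split <;> ring

-- ===== VERDICT (by name: the statement is the Claim_ definition above) =====
theorem score_pair_spec : Claim_equal_score_pair := by
  intro p1 p2 match_ mismatch _ hpre
  unfold Spec_score_pair score_pair score_pair_alt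
  rw [spGo_eq_zipScore match_ mismatch p1.toList.length _ _ rfl hpre]
  rw [show (PySem.Str.len p1 : Int) = (p1.toList.length : Int) by simp [PySem.Str.len_eq]]
  exact foldA_eq_zipScore match_ mismatch p1.toList p2.toList hpre
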